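-- pv_equiv track=rewrite | github.com/Ntropy86/Conversational | backend/llm_service.py | _select_diverse_items
-- ===== SOURCE A (Python) =====
-- def _select_diverse_items(items: list, max_items: int) -> list:
--     """Select diverse items across different content types and categories"""
--     if len(items) <= max_items:
--         return items
--
--     # Group items by content source (projects, experience, publications)
--     grouped = {}
--     for item in items:
--         source = item.get("content_source", "unknown")
--         if source not in grouped:
--             grouped[source] = []
--         grouped[source].append(item)
--
--     # Select items with diversity
--     selected = []
--     content_types = list(grouped.keys())
--
--     # Round-robin selection across content types
--     while len(selected) < max_items and any(grouped.values()):
--         for content_type in content_types: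
--             if len(selected) >= max_items:
--                 break
--             if grouped[content_type]:
--                 selected.append(grouped[content_type].pop(0))
--
--     return selected
-- ===== SOURCE B (Python) =====
-- def _select_diverse_items(items: list, max_items: int) -> list:
--     """Select diverse items across content sources: interleave the groups
--     column by column and take a prefix, instead of an incremental
--     round-robin pop loop."""
--     if len(items) <= max_items:
--         return items
--
--     # Group items by content source (dict keeps first-appearance order)
--     grouped = {}
--     for item in items:
--         grouped.setdefault(item.get("content_source", "unknown"), []).append(item)
--
--     # Build the full round-robin interleaving in one go, then slice it.
--     cols = list(grouped.values())
--     width = 0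
--     for g in cols:
--         width = max(width, len(g))
--     interleaved = [g[i] for i in range(width) for g in cols if i < len(g)]
--     return interleaved[:max(0, max_items)]
-- ===== Notes on version B (the rewrite author's own statement) =====
-- stated objective: simpler
-- what changed: The incremental round-robin while-loop with break checks and pop(0) is replaced by building the whole column-major interleaving of the groups in one comprehension and slicing its prefix.
import Mathlib
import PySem

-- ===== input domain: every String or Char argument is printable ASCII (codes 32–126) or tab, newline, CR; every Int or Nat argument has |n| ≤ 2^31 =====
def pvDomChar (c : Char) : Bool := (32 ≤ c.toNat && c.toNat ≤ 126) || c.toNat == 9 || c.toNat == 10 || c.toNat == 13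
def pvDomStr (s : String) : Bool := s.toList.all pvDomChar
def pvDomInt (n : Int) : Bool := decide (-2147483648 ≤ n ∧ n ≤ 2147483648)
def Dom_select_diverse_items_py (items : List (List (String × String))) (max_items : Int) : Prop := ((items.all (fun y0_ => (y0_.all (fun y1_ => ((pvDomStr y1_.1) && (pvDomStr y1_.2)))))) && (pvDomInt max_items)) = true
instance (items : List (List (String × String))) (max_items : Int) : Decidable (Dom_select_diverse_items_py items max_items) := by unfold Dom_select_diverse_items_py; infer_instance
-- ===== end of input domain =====

-- B replaces A's incremental round-robin while-loop (pop(0) + break checks) by building the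
-- whole column-major interleaving of the groups at once and taking its prefix (objective: simpler).


-- ===== PORT A =====

-- item.get("content_source", "unknown"): first-match lookup in the item's association list
def pvSrcOf (item : List (String × String)) : String :=
  (PySem.Dict.mk item).getD "content_source" "unknown"

-- the inner `for content_type in content_types:` pass (break once max_items is reached;
-- `grouped[content_type].pop(0)` is modelled by re-inserting the tail at the same key)
def pvPassA (m : Int) :
    List String → PySem.Dict String (List (List (String × String))) → List (List (String × String)) →
    PySem.Dict String (List (List (String × String))) × List (List (String × String))
  | [], d, sel => (d, sel)
  | k :: ks, d, sel =>
    if m ≤ (sel.length : Int) then (d, sel)          -- break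
    else
      match d.getD k [] with
      | [] => pvPassA m ks d sel
      | x :: rest => pvPassA m ks (d.insert k rest) (sel ++ [x])

-- the outer `while len(selected) < max_items and any(grouped.values()):` loop;
-- the fuel only makes the loop total (each entered pass pops at least one item, so
-- (total number of grouped items) + 1 iterations always suffice)
def pvLoopA (m : Int) :
    Nat → PySem.Dict String (List (List (String × String))) → List String → List (List (String × String)) →
    List (List (String × String))
  | 0, _, _, sel => sel
  | fuel + 1, d, ks, sel =>
    if (sel.length : Int) < m ∧ d.values.any (fun g => !g.isEmpty) then
      let r := pvPassA m ks d sel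
      pvLoopA m fuel r.1 ks r.2
    else sel

def select_diverse_items_py (items : List (List (String × String))) (max_items : Int) :
    List (List (String × String)) :=
  if (items.length : Int) ≤ max_items then items
  else
    let grouped := items.foldl (fun d it => d.modify (pvSrcOf it) [] (· ++ [it])) PySem.Dict.empty
    let content_types := grouped.keys
    pvLoopA max_items ((grouped.values.map List.length).sum + 1) grouped content_types []

-- ===== PORT B =====

def select_diverse_items_py_alt (items : List (List (String × String))) (max_items : Int) :
    List (List (String × String)) :=
  if (items.length : Int) ≤ max_items then items
  else
    let grouped := items.foldl (fun d it => d.modify (pvSrcOf it) [] (· ++ [it])) PySem.Dict.empty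
    let cols := grouped.values
    let width := cols.foldl (fun w g => max w g.length) 0
    let interleaved := (List.range width).flatMap (fun i => cols.filterMap (fun g => g[i]?))
    PySem.List.slice interleaved none (some (max 0 max_items))

-- ===== PRECONDITION & SPEC =====
def Spec_select_diverse_items_py (items : List (List (String × String))) (max_items : Int) (out : List (List (String × String))) : Prop := out = select_diverse_items_py_alt items max_items
instance (items : List (List (String × String))) (max_items : Int) (out : List (List (String × String))) : Decidable (Spec_select_diverse_items_py items max_items out) := by unfold Spec_select_diverse_items_py; infer_instance

-- ===== CLAIM (what is proved, stated in full; the proofs are below) =====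
def Claim_equal_select_diverse_items_py : Prop := ∀ (items : List (List (String × String))) (max_items : Int), Dom_select_diverse_items_py items max_items → Spec_select_diverse_items_py items max_items (select_diverse_items_py items max_items)

-- ===== LEMMAS AND PROOFS =====

-- proof-only abbreviations for B's width / column interleaving
def pvWidth (cols : List (List (List (String × String)))) : Nat :=
  cols.foldl (fun w g => max w g.length) 0

def pvCol (cols : List (List (List (String × String)))) : List (List (String × String)) :=
  (List.range (pvWidth cols)).flatMap (fun i => cols.filterMap (fun g => g[i]?))

theorem pvWidth_foldl (cols : List (List (List (String × String)))) :
    ∀ a : Nat, cols.foldl (fun w g => max w g.length) a = max a (pvWidth cols) := by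
  induction cols with
  | nil => intro a; simp [pvWidth]
  | cons g gs ih =>
    intro a
    have h2 : pvWidth (g :: gs) = max (max 0 g.length) (pvWidth gs) := by
      rw [pvWidth, List.foldl_cons, ih]
    rw [List.foldl_cons, ih, h2]
    omega

theorem pvWidth_cons (g : List (List (String × String))) (gs : List (List (List (String × String)))) :
    pvWidth (g :: gs) = max (max 0 g.length) (pvWidth gs) := by
  rw [pvWidth, List.foldl_cons, pvWidth_foldl]

theorem pvWidth_eq_zero {cols : List (List (List (String × String)))} :
    pvWidth cols = 0 ↔ ∀ g ∈ cols, g = [] := by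
  induction cols with
  | nil => simp [pvWidth]
  | cons g gs ih =>
    rw [pvWidth_cons]
    constructor
    · intro h
      have hg : g.length = 0 := by omega
      have hgs : pvWidth gs = 0 := by omega
      intro x hx
      rcases List.mem_cons.1 hx with hx | hx
      · exact hx ▸ List.eq_nil_of_length_eq_zero hg
      · exact ih.1 hgs x hx
    · intro h
      have hg : g = [] := h g List.mem_cons_self
      have hgs : pvWidth gs = 0 := ih.2 (fun x hx => h x (List.mem_cons_of_mem g hx))
      rw [hg, hgs]
      simp

theorem pvWidth_tail (cols : List (List (List (String × String)))) :
    pvWidth (cols.map List.tail) = pvWidth cols - 1 := by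
  induction cols with
  | nil => simp [pvWidth]
  | cons g gs ih =>
    rw [List.map_cons, pvWidth_cons, pvWidth_cons, ih]
    have : g.tail.length = g.length - 1 := by simp [List.length_tail]
    omega

theorem pvCol_step (cols : List (List (List (String × String)))) :
    pvCol cols = cols.filterMap (fun g => g[0]?) ++ pvCol (cols.map List.tail) := by
  unfold pvCol
  have htails : pvWidth (cols.map List.tail) = pvWidth cols - 1 := pvWidth_tail cols
  rcases hW : pvWidth cols with _ | w
  · have hall := pvWidth_eq_zero.1 hW
    have h0 : cols.filterMap (fun g => g[0]?) = [] := by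
      rw [List.filterMap_eq_nil_iff]
      intro g hg; rw [hall g hg]; rfl
    rw [hW] at htails
    rw [htails, h0]
    simp
  · rw [hW] at htails
    simp only [Nat.add_sub_cancel] at htails
    rw [htails, List.range_succ_eq_map, List.flatMap_cons, List.flatMap_map]
    congr 1
    apply List.flatMap_congr
    intro i _
    rw [List.filterMap_map]
    apply List.filterMap_congr
    intro g _
    simp [List.getElem?_tail]

theorem pvCol_nil_of_all_empty {cols : List (List (List (String × String)))}
    (h : ∀ g ∈ cols, g = []) : pvCol cols = [] := by
  unfold pvCol
  rw [pvWidth_eq_zero.2 h]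
  simp

-- sum of lengths strictly decreases when all groups are replaced by their tails
-- and at least one group was nonempty
theorem pvSum_tail_lt {cols : List (List (List (String × String)))}
    (h : ∃ g ∈ cols, g ≠ []) :
    ((cols.map List.tail).map List.length).sum < (cols.map List.length).sum := by
  induction cols with
  | nil => simp at h
  | cons g gs ih =>
    have htail : ∀ gl : List (List (String × String)), gl.tail.length ≤ gl.length := by
      intro gl; simp [List.length_tail]
    have hle : ((gs.map List.tail).map List.length).sum ≤ (gs.map List.length).sum := by
      rw [List.map_map]
      exact List.sum_le_sum (fun gl _ => htail gl)
    rcases h with ⟨g', hg', hne⟩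
    rcases List.mem_cons.1 hg' with hg' | hg'
    · subst hg'
      have : g'.tail.length < g'.length := by
        cases g' with
        | nil => simp at hne
        | cons a t => simp
      simp only [List.map_cons, List.sum_cons]
      omega
    · have := ih ⟨g', hg', hne⟩
      have := htail g
      simp only [List.map_cons, List.sum_cons]
      omega

-- step-unfolding lemmas for the pass
theorem pvPassA_cons_break {m : Int} {k : String} {ks : List String}
    {d : PySem.Dict String (List (List (String × String)))} {sel : List (List (String × String))}
    (hm : m ≤ (sel.length : Int)) : pvPassA m (k :: ks) d sel = (d, sel) := by
  simp only [pvPassA]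
  rw [if_pos hm]

theorem pvPassA_cons_empty {m : Int} {k : String} {ks : List String}
    {d : PySem.Dict String (List (List (String × String)))} {sel : List (List (String × String))}
    (hm : ¬ m ≤ (sel.length : Int)) (hg : d.getD k [] = []) :
    pvPassA m (k :: ks) d sel = pvPassA m ks d sel := by
  simp only [pvPassA]
  rw [if_neg hm, hg]

theorem pvPassA_cons_pop {m : Int} {k : String} {ks : List String}
    {d : PySem.Dict String (List (List (String × String)))} {sel : List (List (String × String))}
    {x : List (String × String)} {rest : List (List (String × String))}
    (hm : ¬ m ≤ (sel.length : Int)) (hg : d.getD k [] = x :: rest) :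
    pvPassA m (k :: ks) d sel = pvPassA m ks (d.insert k rest) (sel ++ [x]) := by
  simp only [pvPassA]
  rw [if_neg hm, hg]

-- one inner pass: it appends the (truncated) list of group heads, and — when not
-- truncated — leaves the tails behind at every key it visited
theorem pvPassA_spec (m : Int) :
    ∀ (ks : List String) (d : PySem.Dict String (List (List (String × String))))
      (sel : List (List (String × String))), ks.Nodup →
      (pvPassA m ks d sel).2 =
        sel ++ ((ks.map (fun k => d.getD k [])).filterMap (fun g => g[0]?)).take (m - sel.length).toNat ∧
      (((ks.map (fun k => d.getD k [])).filterMap (fun g => g[0]?)).length ≤ (m - sel.length).toNat →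
        (∀ k', (pvPassA m ks d sel).1.getD k' [] =
          if k' ∈ ks then (d.getD k' []).tail else d.getD k' []) ∧
        (pvPassA m ks d sel).1.keys = d.keys) := by
  intro ks
  induction ks with
  | nil =>
    intro d sel _
    refine ⟨by simp [pvPassA], fun _ => ⟨fun k' => by simp [pvPassA], rfl⟩⟩
  | cons k ks ih =>
    intro d sel hnd
    have hk : k ∉ ks := (List.nodup_cons.1 hnd).1
    have hnd' : ks.Nodup := (List.nodup_cons.1 hnd).2
    by_cases hm : m ≤ (sel.length : Int)
    · -- break: nothing taken, dict untouched; all visited groups must then be empty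
      have ht : (m - (sel.length : Int)).toNat = 0 := by omega
      rw [pvPassA_cons_break hm]
      refine ⟨by simp [ht], ?_⟩
      intro hlen
      rw [ht, Nat.le_zero, List.length_eq_zero_iff, List.filterMap_eq_nil_iff] at hlen
      have hempty : ∀ k' ∈ k :: ks, d.getD k' [] = [] := by
        intro k' hk'
        have := hlen (d.getD k' []) (List.mem_map.2 ⟨k', hk', rfl⟩)
        cases hgk : d.getD k' [] with
        | nil => rfl
        | cons a t => rw [hgk] at this; simp at this
      refine ⟨fun k' => ?_, rfl⟩
      by_cases hk' : k' ∈ k :: ks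
      · rw [hempty k' hk', if_pos hk']
        rfl
      · rw [if_neg hk']
    · rcases hg : d.getD k [] with _ | ⟨x, rest⟩
      · -- empty group: skipped
        have h1 := ih d sel hnd'
        rw [pvPassA_cons_empty hm hg]
        constructor
        · rw [h1.1, List.map_cons, hg, List.filterMap_cons]
          simp
        · intro hlen
          rw [List.map_cons, hg, List.filterMap_cons] at hlen
          simp only [List.getElem?_nil] at hlen
          have h2 := h1.2 hlen
          refine ⟨fun k' => ?_, h2.2⟩
          rw [h2.1 k']
          by_cases hk' : k' = k
          · subst hk'
            rw [if_neg hk, if_pos List.mem_cons_self, hg]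
            rfl
          · simp [List.mem_cons, hk']
      · -- nonempty group: pop its head
        have h1 := ih (d.insert k rest) (sel ++ [x]) hnd'
        have hmap : ks.map (fun k' => (d.insert k rest).getD k' []) = ks.map (fun k' => d.getD k' []) := by
          apply List.map_congr_left
          intro k' hk'
          exact PySem.Dict.getD_insert_of_ne d rest [] (fun h => hk (h ▸ hk'))
        rw [pvPassA_cons_pop hm hg]
        constructor
        · have := h1.1
          rw [hmap] at this
          rw [this]
          have harith : (m - (sel.length : Int)).toNat = ((m - (((sel ++ [x]).length : Nat) : Int)).toNat) + 1 := by
            simp only [List.length_append, List.length_cons, List.length_nil]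
            push_cast
            omega
          rw [List.map_cons, hg, List.filterMap_cons]
          simp only [List.getElem?_cons_zero, harith, List.take_succ_cons]
          simp
        · intro hlen
          rw [List.map_cons, hg, List.filterMap_cons] at hlen
          simp only [List.getElem?_cons_zero] at hlen
          have hlen' : ((ks.map (fun k' => (d.insert k rest).getD k' [])).filterMap (fun g => g[0]?)).length
              ≤ (m - (((sel ++ [x]).length : Nat) : Int)).toNat := by
            rw [hmap]
            simp only [List.length_cons, List.length_append, List.length_nil] at hlen ⊢
            push_cast at hlen ⊢
            omega
          have h2 := h1.2 hlen'
          refine ⟨fun k' => ?_, ?_⟩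
          · rw [h2.1 k']
            by_cases hk' : k' = k
            · subst hk'
              rw [if_neg hk, if_pos List.mem_cons_self, hg,
                PySem.Dict.getD_insert_self]
              rfl
            · by_cases hks : k' ∈ ks
              · rw [if_pos hks, if_pos (List.mem_cons_of_mem k hks),
                  PySem.Dict.getD_insert_of_ne d rest [] hk']
              · rw [if_neg hks, if_neg (by simp [List.mem_cons, hk', hks]),
                  PySem.Dict.getD_insert_of_ne d rest [] hk']
          · rw [h2.2]
            apply PySem.Dict.keys_insert_of_contains
            by_cases hc : d.contains k
            · exact hc
            · exfalso
              have := PySem.Dict.getD_of_not_contains (d := d) (k := k) (d0 := ([] : List (List (String × String)))) (by simpa using hc)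
              rw [hg] at this
              simp at this

theorem pvLoopA_stop (m : Int) (fuel : Nat) (d : PySem.Dict String (List (List (String × String))))
    (ks : List String) (sel : List (List (String × String))) (h : m ≤ (sel.length : Int)) :
    pvLoopA m fuel d ks sel = sel := by
  cases fuel with
  | zero => rfl
  | succ t =>
    simp only [pvLoopA]
    rw [if_neg (fun hc => absurd hc.1 (not_lt.2 h))]

-- the while loop realises: take (max_items - len selected) of the column interleaving
theorem pvLoopA_eq (m : Int) (ks : List String) (hnd : ks.Nodup) :
    ∀ (fuel : Nat) (d : PySem.Dict String (List (List (String × String))))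
      (sel : List (List (String × String))),
      d.keys = ks → ((d.values.map List.length).sum < fuel) →
      pvLoopA m fuel d ks sel =
        sel ++ (pvCol (ks.map (fun k => d.getD k []))).take (m - sel.length).toNat := by
  intro fuel
  induction fuel with
  | zero => intro d sel _ hf; omega
  | succ t ih =>
    intro d sel hkeys hf
    have hvals : d.values = ks.map (fun k => d.getD k []) := by
      rw [PySem.Dict.values_eq_map_keys d (hkeys ▸ hnd) [], hkeys]
    set hs := ks.map (fun k => d.getD k []) with hhs
    by_cases hcond : (sel.length : Int) < m ∧ d.values.any (fun g => !g.isEmpty)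
    · have hspec := pvPassA_spec m ks d sel hnd
      set f := hs.filterMap (fun g => g[0]?) with hf0
      have hr : (0 : Nat) < (m - (sel.length : Int)).toNat := by omega
      have hstep : pvCol hs = f ++ pvCol (hs.map List.tail) := pvCol_step hs
      by_cases htr : f.length ≤ (m - (sel.length : Int)).toNat
      · -- full pass completes; recurse on the tails
        have hsel' := hspec.1
        have hd' := hspec.2 htr
        have hne : ∃ g ∈ hs, g ≠ [] := by
          rcases List.any_eq_true.1 hcond.2 with ⟨g, hg, hgb⟩
          exact ⟨g, hvals ▸ hg, by simpa using hgb⟩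
        have hd'vals : (pvPassA m ks d sel).1.values =
            ks.map (fun k => (pvPassA m ks d sel).1.getD k []) := by
          rw [PySem.Dict.values_eq_map_keys _ (hd'.2 ▸ (hkeys ▸ hnd)) [], hd'.2, hkeys]
        have hd'map : ks.map (fun k => (pvPassA m ks d sel).1.getD k []) = hs.map List.tail := by
          rw [hhs, List.map_map]
          apply List.map_congr_left
          intro k' hk'
          rw [hd'.1 k', if_pos hk']
          rfl
        have hsum : ((pvPassA m ks d sel).1.values.map List.length).sum < t := by
          rw [hd'vals, hd'map]
          have := pvSum_tail_lt hne
          rw [hvals] at hf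
          omega
        have hrec := ih (pvPassA m ks d sel).1 (pvPassA m ks d sel).2 (hd'.2.trans hkeys) hsum
        simp only [pvLoopA, if_pos hcond]
        rw [hrec, hd'map, hsel', List.take_of_length_le htr]
        have harith : (m - (((sel ++ f).length : Nat) : Int)).toNat
            = (m - (sel.length : Int)).toNat - f.length := by
          simp only [List.length_append]
          push_cast
          omega
        rw [harith, hstep, List.take_append, List.take_of_length_le htr, List.append_assoc]
      · -- the pass is truncated: selected reaches max_items, loop stops next round
        have hsel' := hspec.1
        have hlen : (pvPassA m ks d sel).2.length = sel.length + (m - (sel.length : Int)).toNat := by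
          rw [hsel', List.length_append, List.length_take]
          omega
        have hstop : m ≤ ((pvPassA m ks d sel).2.length : Int) := by
          rw [hlen]; push_cast; omega
        simp only [pvLoopA, if_pos hcond]
        rw [pvLoopA_stop m t _ ks _ hstop, hsel', hstep, List.take_append]
        have h0 : (m - (sel.length : Int)).toNat - f.length = 0 := by omega
        rw [h0, List.take_zero, List.append_nil]
    · -- loop condition is false: nothing (more) is selected
      simp only [pvLoopA, if_neg hcond]
      rcases not_and_or.1 hcond with hm | hany
      · have : (m - (sel.length : Int)).toNat = 0 := by omega
        rw [this, List.take_zero, List.append_nil]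
      · have hempty : ∀ g ∈ hs, g = [] := by
          intro g hg
          by_contra hne
          exact hany (List.any_eq_true.2 ⟨g, hvals ▸ hg, by simpa using hne⟩)
        rw [pvCol_nil_of_all_empty hempty]
        simp

-- ===== VERDICT (by name: the statement is the Claim_ definition above) =====
theorem select_diverse_items_py_spec : Claim_equal_select_diverse_items_py := by
  intro items max_items _
  unfold Spec_select_diverse_items_py select_diverse_items_py select_diverse_items_py_alt
  by_cases hguard : (items.length : Int) ≤ max_items
  · rw [if_pos hguard, if_pos hguard]
  · rw [if_neg hguard, if_neg hguard]
    set grouped := items.foldl (fun d it => d.modify (pvSrcOf it) [] (· ++ [it])) PySem.Dict.empty with hgdef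
    have hnd : grouped.keys.Nodup := by
      rw [hgdef]
      exact PySem.Dict.nodup_keys_foldl_modify_key items pvSrcOf [] (fun _ it => (· ++ [it]))
        PySem.Dict.empty PySem.Dict.nodup_keys_empty
    have hvals : grouped.values = grouped.keys.map (fun k => grouped.getD k []) :=
      PySem.Dict.values_eq_map_keys grouped hnd []
    rw [pvLoopA_eq max_items grouped.keys hnd ((grouped.values.map List.length).sum + 1)
      grouped [] rfl (Nat.lt_succ_self _)]
    rw [List.nil_append, ← hvals]
    change List.take _ _ = PySem.List.slice (pvCol grouped.values) none (some (max 0 max_items))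
    rw [PySem.List.slice_to (pvCol grouped.values) (le_max_left 0 max_items)]
    congr 1
    simp only [List.length_nil]
    omega
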